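-- pv_equiv track=rewrite | github.com/djwoun/geomind | graph.py | find_model_like
-- ===== SOURCE A (Python) =====
-- def find_model_like(values, substrs):
--     t = [s.lower() for s in substrs]
--     for v in values:
--         vl = str(v).lower()
--         if all(ss in vl for ss in t):
--             return v
--     for v in values:
--         vl = str(v).lower()
--         if t[0] in vl:
--             return v
--     return None
-- ===== SOURCE B (Python) =====
-- def find_model_like(values, substrs):
--     t = [s.lower() for s in substrs]
--     fallback = None
--     for v in values:
--         vl = str(v).lower()
--         if all(ss in vl for ss in t):
--             return v
--         if fallback is None and t and t[0] in vl:
--             fallback = v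
--     return fallback
-- ===== Notes on version B (the rewrite author's own statement) =====
-- stated objective: simpler
-- what changed: Replaces A's two sequential passes over values by a single pass that returns the first full match immediately and latches the first t[0] match as a fallback.
import Mathlib
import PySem

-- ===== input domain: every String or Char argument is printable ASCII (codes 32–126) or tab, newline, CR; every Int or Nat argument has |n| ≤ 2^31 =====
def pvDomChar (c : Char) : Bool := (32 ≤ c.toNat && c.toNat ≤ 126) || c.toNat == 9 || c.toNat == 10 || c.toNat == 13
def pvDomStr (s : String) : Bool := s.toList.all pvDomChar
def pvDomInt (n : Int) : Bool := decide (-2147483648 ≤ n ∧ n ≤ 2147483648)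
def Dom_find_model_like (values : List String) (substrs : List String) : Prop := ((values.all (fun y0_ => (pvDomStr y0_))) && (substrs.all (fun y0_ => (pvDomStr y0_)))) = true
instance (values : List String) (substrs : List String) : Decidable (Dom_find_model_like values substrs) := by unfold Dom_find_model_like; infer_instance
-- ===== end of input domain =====

-- B replaces A's two sequential passes over `values` by a single pass that returns the
-- first full match immediately and latches the first t[0] match as a fallback (objective: simpler).


-- ===== PORT A =====
-- first loop: return the first v whose lowercase contains every lowered substring
def fmlLoop1 (t : List String) : List String → Option String
  | [] => none
  | v :: rest =>
    let vl := PySem.Str.lower v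
    if t.all (fun ss => PySem.Str.isIn ss vl) then some v else fmlLoop1 t rest
-- second loop: return the first v whose lowercase contains t[0].
-- `t[0]` is written `t.headD ""`: Python would raise IndexError here only when t = [] and the
-- loop body runs, which is unreachable (with t = [] the first loop already returned on any value).
def fmlLoop2 (t : List String) : List String → Option String
  | [] => none
  | v :: rest =>
    let vl := PySem.Str.lower v
    if PySem.Str.isIn (t.headD "") vl then some v else fmlLoop2 t rest

def find_model_like (values : List String) (substrs : List String) : Option String :=
  let t := substrs.map PySem.Str.lower
  match fmlLoop1 t values with
  | some v => some v
  | none =>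
    match fmlLoop2 t values with
    | some v => some v
    | none => none

-- ===== PORT B =====
-- single pass with a latched fallback
def fmlAltLoop (t : List String) (fallback : Option String) : List String → Option String
  | [] => fallback
  | v :: rest =>
    let vl := PySem.Str.lower v
    if t.all (fun ss => PySem.Str.isIn ss vl) then some v
    else if fallback.isNone && !t.isEmpty && PySem.Str.isIn (t.headD "") vl then
      fmlAltLoop t (some v) rest
    else fmlAltLoop t fallback rest

def find_model_like_alt (values : List String) (substrs : List String) : Option String :=
  let t := substrs.map PySem.Str.lower
  fmlAltLoop t none values

-- ===== PRECONDITION & SPEC =====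
def Spec_find_model_like (values : List String) (substrs : List String) (out : Option String) : Prop := out = find_model_like_alt values substrs
instance (values : List String) (substrs : List String) (out : Option String) : Decidable (Spec_find_model_like values substrs out) := by unfold Spec_find_model_like; infer_instance

-- ===== CLAIM (what is proved, stated in full; the proofs are below) =====
def Claim_equal_find_model_like : Prop := ∀ (values : List String) (substrs : List String), Dom_find_model_like values substrs → Spec_find_model_like values substrs (find_model_like values substrs)

-- ===== LEMMAS AND PROOFS =====

-- The single pass equals: first loop's result, else the initial fallback, else the second loop's result.
lemma fmlAltLoop_eq (t : List String) (values : List String) :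
    ∀ fb : Option String, fmlAltLoop t fb values =
      match fmlLoop1 t values with
      | some v => some v
      | none => match fb with
                | some x => some x
                | none => fmlLoop2 t values := by
  induction values with
  | nil => intro fb; cases fb <;> simp [fmlAltLoop, fmlLoop1, fmlLoop2]
  | cons v rest ih =>
    intro fb
    by_cases hall : ∀ x ∈ t, PySem.Chars.isIn x.toList (PySem.Chars.lower v.toList) = true
    · have hall' : (t.all fun ss => PySem.Str.isIn ss (PySem.Str.lower v)) = true := by
        simpa using hall
      simp only [fmlAltLoop, fmlLoop1, hall']; simp
    · have ht : t ≠ [] := by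
        intro h; subst h; exact hall (by simp)
      cases fb with
      | some x =>
        simp [fmlAltLoop, fmlLoop1, hall, ih]
      | none =>
        by_cases hin : PySem.Chars.isIn (t.head?.getD "").toList (PySem.Chars.lower v.toList) = true
        · simp [fmlAltLoop, fmlLoop1, fmlLoop2, hall, hin, ht, ih]
        · simp [fmlAltLoop, fmlLoop1, fmlLoop2, hall, hin, ih]

-- ===== VERDICT (by name: the statement is the Claim_ definition above) =====
theorem find_model_like_spec : Claim_equal_find_model_like := by
  intro values substrs _
  unfold Spec_find_model_like find_model_like find_model_like_alt
  rw [fmlAltLoop_eq]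
  cases h1 : fmlLoop1 (substrs.map PySem.Str.lower) values <;>
    cases h2 : fmlLoop2 (substrs.map PySem.Str.lower) values <;> simp [h1, h2]
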